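-- pv_equiv track=rewrite | github.com/capgalea/biotech_hybridGraphRAG_KG_streamlit | pages/collaboration_page.py | parse_collaboration_response
-- ===== SOURCE A (Python) =====
-- def parse_collaboration_response(response_text):
--     """Parse the LLM response to extract collaboration opportunities"""
--     # Split the response into sections
--     sections = []
--     current_section = ""
--
--     lines = response_text.split('\n')
--     for line in lines:
--         if line.strip().startswith('#') or line.strip().startswith('**') and line.strip().endswith('**'):
--             # New section header
--             if current_section.strip():
--                 sections.append(current_section.strip())
--             current_section = line + '\n'
--         else:
--             current_section += line + '\n'
--
--     # Add the last section
--     if current_section.strip():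
--         sections.append(current_section.strip())
--
--     return sections
-- ===== SOURCE B (Python) =====
-- def parse_collaboration_response(response_text):
--     """Parse the LLM response to extract collaboration opportunities"""
--     def is_header(line):
--         s = line.strip()
--         return s.startswith('#') or (s.startswith('**') and s.endswith('**'))
--
--     lines = response_text.split('\n')
--     # Boundary indices: 0 plus every header line index; consecutive pairs give
--     # the [start, next_start) line ranges of the sections.
--     bounds = [0] + [i for i, line in enumerate(lines) if is_header(line)] + [len(lines)]
--     return [sec for sec in ('\n'.join(lines[a:b]).strip()
--                             for a, b in zip(bounds, bounds[1:])) if sec]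
-- ===== Notes on version B (the rewrite author's own statement) =====
-- stated objective: alternative
-- what changed: Replaces A's single-pass running string accumulator with flush-on-header by a staged index computation: first collect the header line indices, form boundary pairs [start, next_start) over the line list, then slice/join/strip each range and keep the non-empty sections.
import Mathlib
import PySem

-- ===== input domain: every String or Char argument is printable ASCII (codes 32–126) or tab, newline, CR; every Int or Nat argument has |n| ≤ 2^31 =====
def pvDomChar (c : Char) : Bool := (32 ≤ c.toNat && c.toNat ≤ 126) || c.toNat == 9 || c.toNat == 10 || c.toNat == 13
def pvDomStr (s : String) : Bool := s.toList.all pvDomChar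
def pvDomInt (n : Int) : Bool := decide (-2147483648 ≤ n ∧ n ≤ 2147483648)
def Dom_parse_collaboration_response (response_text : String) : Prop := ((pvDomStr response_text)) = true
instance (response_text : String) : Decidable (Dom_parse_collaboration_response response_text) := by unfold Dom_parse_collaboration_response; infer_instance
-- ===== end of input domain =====

-- B replaces A's running string accumulator (flush-on-header) by a staged index computation:
-- collect the header line indices, form boundary pairs [start, next_start), then slice/join/strip
-- each range and keep the non-empty sections (objective: alternative decomposition, same cost).

-- ===== PORT A =====
-- A: running accumulator, flushed (stripped, appended if non-empty) at each header and at the end.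
def parse_collaboration_response (response_text : String) : List String :=
  let lines := PySem.Chars.splitOn response_text.toList ['\n']
  let st := lines.foldl (fun (st : List (List Char) × List Char) line =>
    if PySem.Chars.startswith (PySem.Chars.strip line) ['#'] ||
       (PySem.Chars.startswith (PySem.Chars.strip line) ['*','*'] &&
        PySem.Chars.endswith (PySem.Chars.strip line) ['*','*']) then
      ((if PySem.Chars.strip st.2 ≠ [] then st.1 ++ [PySem.Chars.strip st.2] else st.1),
       line ++ ['\n'])
    else
      (st.1, st.2 ++ line ++ ['\n'])) ([], [])
  (if PySem.Chars.strip st.2 ≠ [] then st.1 ++ [PySem.Chars.strip st.2] else st.1).map String.ofList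

-- ===== PORT B =====
-- is_header(line)
def pvIsHeader (line : List Char) : Bool :=
  let s := PySem.Chars.strip line
  PySem.Chars.startswith s ['#'] ||
    (PySem.Chars.startswith s ['*','*'] && PySem.Chars.endswith s ['*','*'])

-- B: bounds = [0] + header indices + [len(lines)]; sections from consecutive [a,b) slices.
def parse_collaboration_response_alt (response_text : String) : List String :=
  let lines := PySem.Chars.splitOn response_text.toList ['\n']
  let bounds : List Int :=
    0 :: ((PySem.List.enumerate lines).filter (fun p => pvIsHeader p.2)).map (·.1)
      ++ [(lines.length : Int)]
  (((bounds.zip bounds.tail).map (fun p =>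
      PySem.Chars.strip (PySem.Chars.join ['\n'] (PySem.List.slice lines (some p.1) (some p.2))))).filter
    (fun s => s ≠ [])).map String.ofList

-- ===== PRECONDITION & SPEC =====
def Spec_parse_collaboration_response (response_text : String) (out : List String) : Prop := out = parse_collaboration_response_alt response_text
instance (response_text : String) (out : List String) : Decidable (Spec_parse_collaboration_response response_text out) := by unfold Spec_parse_collaboration_response; infer_instance

-- ===== CLAIM (what is proved, stated in full; the proofs are below) =====
def Claim_equal_parse_collaboration_response : Prop := ∀ (response_text : String), Dom_parse_collaboration_response response_text → Spec_parse_collaboration_response response_text (parse_collaboration_response response_text)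

-- ===== LEMMAS AND PROOFS =====

-- proof-side name for A's loop body and final flush
def pvStepA (st : List (List Char) × List Char) (line : List Char) : List (List Char) × List Char :=
  if PySem.Chars.startswith (PySem.Chars.strip line) ['#'] ||
     (PySem.Chars.startswith (PySem.Chars.strip line) ['*','*'] &&
      PySem.Chars.endswith (PySem.Chars.strip line) ['*','*']) then
    ((if PySem.Chars.strip st.2 ≠ [] then st.1 ++ [PySem.Chars.strip st.2] else st.1),
     line ++ ['\n'])
  else
    (st.1, st.2 ++ line ++ ['\n'])

def pvFlush (st : List (List Char) × List Char) : List (List Char) :=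
  if PySem.Chars.strip st.2 ≠ [] then st.1 ++ [PySem.Chars.strip st.2] else st.1

-- A's accumulator after ingesting the lines c: each line followed by '\n'.
def pvJoinNl (c : List (List Char)) : List Char := (c.map (· ++ ['\n'])).flatten

-- the common post-processing: join each chunk, strip, keep the non-empty ones
def pvEmit (cs : List (List (List Char))) : List (List Char) :=
  (cs.map (fun c => PySem.Chars.strip (PySem.Chars.join ['\n'] c))).filter (fun s => s ≠ [])

-- the reference grouping: chunks of consecutive lines, a new chunk at every header
def pvSplitH (c : List (List Char)) : List (List Char) → List (List (List Char))
  | [] => [c]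
  | l :: ls => if pvIsHeader l then c :: pvSplitH [l] ls else pvSplitH (c ++ [l]) ls

def pvModH (c : List (List Char)) (xs : List (List (List Char))) : List (List (List Char)) :=
  match xs with
  | [] => [c]
  | h :: t => (c ++ h) :: t

-- B-side skeleton on Nat indices
def pvHIdx : List (List Char) → List Nat
  | [] => []
  | l :: ls => (if pvIsHeader l then [0] else []) ++ (pvHIdx ls).map (· + 1)

def pvNB (lines : List (List Char)) : List (Nat × Nat) :=
  (0 :: (pvHIdx lines ++ [lines.length])).zip (pvHIdx lines ++ [lines.length])

def pvSlicesN (lines : List (List Char)) : List (List (List Char)) :=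
  (pvNB lines).map (fun p => (lines.drop p.1).take (p.2 - p.1))

theorem pvRstrip_nl (s : List Char) :
    PySem.Chars.rstrip (s ++ ['\n']) = PySem.Chars.rstrip s := by
  have h : PySem.Chars.isspace '\n' = true := by decide
  simp [PySem.Chars.rstrip, h]

theorem pvStrip_nl (s : List Char) :
    PySem.Chars.strip (s ++ ['\n']) = PySem.Chars.strip s := by
  unfold PySem.Chars.strip PySem.Chars.lstrip
  rw [List.dropWhile_append]
  by_cases h : (List.dropWhile PySem.Chars.isspace s).isEmpty
  · simp [List.isEmpty_iff.mp h]
    rfl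
  · simp only [h, Bool.false_eq_true, if_false]
    exact pvRstrip_nl _

theorem pvJoinNl_eq (c : List (List Char)) (h : c ≠ []) :
    pvJoinNl c = PySem.Chars.join ['\n'] c ++ ['\n'] := by
  induction c with
  | nil => exact absurd rfl h
  | cons x t ih =>
    cases t with
    | nil => simp [pvJoinNl, PySem.Chars.join, List.intercalate]
    | cons y s =>
      rw [PySem.Chars.join_cons_cons]
      simp only [pvJoinNl, List.map_cons, List.flatten_cons] at *
      rw [ih (by simp)]
      simp

theorem pvStrip_joinNl (c : List (List Char)) :
    PySem.Chars.strip (pvJoinNl c) = PySem.Chars.strip (PySem.Chars.join ['\n'] c) := by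
  cases c with
  | nil => rfl
  | cons x t => rw [pvJoinNl_eq _ (by simp), pvStrip_nl]

theorem pvEmit_append (cs : List (List (List Char))) (c : List (List Char)) :
    pvEmit (cs ++ [c]) =
      pvEmit cs ++ (if PySem.Chars.strip (PySem.Chars.join ['\n'] c) ≠ [] then
        [PySem.Chars.strip (PySem.Chars.join ['\n'] c)] else []) := by
  simp only [pvEmit, List.map_append, List.filter_append, List.map_cons, List.map_nil,
    List.filter_cons, List.filter_nil]
  split_ifs with h1 h2 <;> simp_all

-- the loop invariant: A's final flush of its state equals the emit of the grouped chunks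
theorem pvLoopA (ls : List (List Char)) :
    ∀ (cs : List (List (List Char))) (c : List (List Char)),
    pvFlush (ls.foldl pvStepA (pvEmit cs, pvJoinNl c)) = pvEmit (cs ++ pvSplitH c ls) := by
  induction ls with
  | nil =>
    intro cs c
    simp only [List.foldl_nil, pvSplitH, pvEmit_append, pvFlush, pvStrip_joinNl]
    split <;> simp
  | cons line ls ih =>
    intro cs c
    rw [List.foldl_cons]
    by_cases h : pvIsHeader line
    · have hA : (PySem.Chars.startswith (PySem.Chars.strip line) ['#'] ||
           (PySem.Chars.startswith (PySem.Chars.strip line) ['*','*'] &&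
            PySem.Chars.endswith (PySem.Chars.strip line) ['*','*'])) = true := by
        simpa [pvIsHeader] using h
      have h1 : pvStepA (pvEmit cs, pvJoinNl c) line = (pvEmit (cs ++ [c]), pvJoinNl [line]) := by
        unfold pvStepA
        rw [if_pos hA, pvEmit_append, pvStrip_joinNl]
        refine Prod.ext ?_ ?_
        · split <;> simp
        · simp [pvJoinNl]
      rw [h1, ih (cs ++ [c]) [line]]
      simp [pvSplitH, h]
    · have hA : ¬ ((PySem.Chars.startswith (PySem.Chars.strip line) ['#'] ||
           (PySem.Chars.startswith (PySem.Chars.strip line) ['*','*'] &&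
            PySem.Chars.endswith (PySem.Chars.strip line) ['*','*'])) = true) := by
        simpa [pvIsHeader] using h
      have h1 : pvStepA (pvEmit cs, pvJoinNl c) line = (pvEmit cs, pvJoinNl (c ++ [line])) := by
        unfold pvStepA
        rw [if_neg hA]
        simp [pvJoinNl]
      rw [h1, ih cs (c ++ [line])]
      simp [pvSplitH, h]

-- accumulator characterisation of pvSplitH
theorem pvModH_append (c l : List (List Char)) (xs : List (List (List Char))) :
    pvModH (c ++ l) xs = pvModH c (pvModH l xs) := by
  cases xs <;> simp [pvModH]

theorem pvSplitH_acc (ls : List (List Char)) :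
    ∀ c, pvSplitH c ls = pvModH c (pvSplitH [] ls) := by
  induction ls with
  | nil => intro c; simp [pvSplitH, pvModH]
  | cons l ls ih =>
    intro c
    by_cases h : pvIsHeader l
    · simp [pvSplitH, h, pvModH]
    · rw [show pvSplitH c (l :: ls) = pvSplitH (c ++ [l]) ls from by simp [pvSplitH, h],
          show pvSplitH ([] : List (List Char)) (l :: ls) = pvSplitH [l] ls from by
            simp [pvSplitH, h]]
      rw [ih (c ++ [l]), ih [l], pvModH_append]

-- the enumerate/filter pass computes exactly pvHIdx (shifted by the start)
theorem pvEnumFilter (lines : List (List Char)) :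
    ∀ (s : Int), (((PySem.List.enumerate lines s).filter (fun p => pvIsHeader p.2)).map (·.1))
      = (pvHIdx lines).map (fun (k : Nat) => s + (k : Int)) := by
  induction lines with
  | nil => intro s; simp [PySem.List.enumerate_nil, pvHIdx]
  | cons l ls ih =>
    intro s
    have hx : pvHIdx (l :: ls) = (if pvIsHeader l then [0] else []) ++ (pvHIdx ls).map (· + 1) := rfl
    rw [PySem.List.enumerate_cons, hx, List.filter_cons]
    by_cases h : pvIsHeader l
    · simp only [h, if_pos, List.map_cons, ih (s + 1), List.map_map, List.singleton_append]
      congr 1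
      · simp
      · refine List.map_congr_left (fun k _ => ?_)
        simp only [Function.comp_apply]
        push_cast
        ring
    · simp only [h, Bool.false_eq_true, if_false, ih (s + 1), List.nil_append, List.map_map]
      refine List.map_congr_left (fun k _ => ?_)
      simp only [Function.comp_apply]
      push_cast
      ring

-- the core: the boundary/slice formulation equals the reference grouping
theorem pvSlicesN_eq (lines : List (List Char)) : pvSlicesN lines = pvSplitH [] lines := by
  induction lines with
  | nil => simp [pvSlicesN, pvNB, pvHIdx, pvSplitH]
  | cons l ls ih =>
    obtain ⟨x, r, ht⟩ : ∃ x r, pvHIdx ls ++ [ls.length] = x :: r := by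
      cases pvHIdx ls <;> simp
    have hshift : ((((x+1) :: r.map (· + 1)).zip (r.map (· + 1))).map
        (fun p : Nat × Nat => ((l :: ls).drop p.1).take (p.2 - p.1)))
        = (((x :: r).zip r).map (fun p : Nat × Nat => (ls.drop p.1).take (p.2 - p.1))) := by
      have hmc : ((x+1) :: r.map (· + 1)) = (x :: r).map (· + 1) := by simp
      rw [hmc, List.zip_map, List.map_map]
      refine List.map_congr_left (fun p _ => ?_)
      simp [Nat.add_sub_add_right]
    by_cases h : pvIsHeader l
    · -- header: an extra empty range [0,0), then the shifted ranges with l prepended to the first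
      have hb : pvHIdx (l :: ls) ++ [(l :: ls).length] = 0 :: (x+1) :: r.map (· + 1) := by
        calc pvHIdx (l :: ls) ++ [(l :: ls).length]
            = 0 :: (pvHIdx ls ++ [ls.length]).map (· + 1) := by simp [pvHIdx, h]
          _ = 0 :: (x+1) :: r.map (· + 1) := by rw [ht]; simp
      have hBs : pvSlicesN (l :: ls) = [] :: ((l :: ls).take (x+1)) ::
          (((x :: r).zip r).map (fun p : Nat × Nat => (ls.drop p.1).take (p.2 - p.1))) := by
        rw [pvSlicesN, pvNB, hb, ← hshift]
        simp [List.zip_cons_cons]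
      have hA : pvSlicesN ls = (ls.take x) ::
          (((x :: r).zip r).map (fun p : Nat × Nat => (ls.drop p.1).take (p.2 - p.1))) := by
        rw [pvSlicesN, pvNB, ht]
        simp [List.zip_cons_cons]
      rw [hBs, show pvSplitH ([] : List (List Char)) (l :: ls) = [] :: pvSplitH [l] ls from by
        simp [pvSplitH, h]]
      rw [pvSplitH_acc ls [l], ← ih, hA]
      rfl
    · -- non-header: the first range absorbs l, the rest shift by one
      have hb : pvHIdx (l :: ls) ++ [(l :: ls).length] = (x+1) :: r.map (· + 1) := by
        calc pvHIdx (l :: ls) ++ [(l :: ls).length]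
            = (pvHIdx ls ++ [ls.length]).map (· + 1) := by simp [pvHIdx, h]
          _ = (x+1) :: r.map (· + 1) := by rw [ht]; simp
      have hBs : pvSlicesN (l :: ls) = ((l :: ls).take (x+1)) ::
          (((x :: r).zip r).map (fun p : Nat × Nat => (ls.drop p.1).take (p.2 - p.1))) := by
        rw [pvSlicesN, pvNB, hb, ← hshift]
        simp [List.zip_cons_cons]
      have hA : pvSlicesN ls = (ls.take x) ::
          (((x :: r).zip r).map (fun p : Nat × Nat => (ls.drop p.1).take (p.2 - p.1))) := by
        rw [pvSlicesN, pvNB, ht]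
        simp [List.zip_cons_cons]
      rw [hBs, show pvSplitH ([] : List (List Char)) (l :: ls) = pvSplitH [l] ls from by
        simp [pvSplitH, h]]
      rw [pvSplitH_acc ls [l], ← ih, hA]
      rfl

-- B's port computes pvEmit of the slice formulation
theorem pvAlt_core (lines : List (List Char)) :
    (((0 :: ((PySem.List.enumerate lines).filter (fun p => pvIsHeader p.2)).map (·.1)
        ++ [(lines.length : Int)]).zip
      ((0 :: ((PySem.List.enumerate lines).filter (fun p => pvIsHeader p.2)).map (·.1)
        ++ [(lines.length : Int)]).tail)).map (fun p =>
      PySem.Chars.strip (PySem.Chars.join ['\n'] (PySem.List.slice lines (some p.1) (some p.2)))))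
      = (pvSlicesN lines).map (fun c => PySem.Chars.strip (PySem.Chars.join ['\n'] c)) := by
  have hbounds : (0 :: ((PySem.List.enumerate lines).filter (fun p => pvIsHeader p.2)).map (·.1)
      ++ [(lines.length : Int)])
      = ((0 :: (pvHIdx lines ++ [lines.length])).map (fun k : Nat => (k : Int))) := by
    rw [pvEnumFilter lines 0]
    simp
  rw [hbounds]
  have htail : ((0 :: (pvHIdx lines ++ [lines.length])).map (fun k : Nat => (k : Int))).tail
      = (pvHIdx lines ++ [lines.length]).map (fun k : Nat => (k : Int)) := by simp
  rw [htail, List.zip_map, List.map_map]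
  unfold pvSlicesN pvNB
  rw [List.map_map]
  refine List.map_congr_left (fun p _ => ?_)
  simp [PySem.List.slice_natCast]

theorem pvAlt_eq (response_text : String) :
    parse_collaboration_response_alt response_text
      = (pvEmit (pvSlicesN (PySem.Chars.splitOn response_text.toList ['\n']))).map String.ofList := by
  simp only [parse_collaboration_response_alt]
  rw [pvAlt_core (PySem.Chars.splitOn response_text.toList ['\n'])]
  rfl

-- ===== VERDICT (by name: the statement is the Claim_ definition above) =====
theorem parse_collaboration_response_spec : Claim_equal_parse_collaboration_response := by
  intro response_text _
  unfold Spec_parse_collaboration_response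
  rw [pvAlt_eq, pvSlicesN_eq]
  unfold parse_collaboration_response
  show List.map String.ofList
      (pvFlush (List.foldl pvStepA ([], []) (PySem.Chars.splitOn response_text.toList ['\n'])))
    = _
  rw [show (([], []) : List (List Char) × List Char) = (pvEmit [], pvJoinNl []) from rfl, pvLoopA]
  simp
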